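-- pv_equiv track=rewrite | github.com/halfow/aoc | src/2025/2025-01.py | part2
-- ===== SOURCE A (Python) =====
-- def part2(raw: str):
--     table = str.maketrans({"L": "-", "R": ""})
--     data = map(int, raw.strip().translate(table).split())
--
--     position, MOD = 50, 100
--     for n in data:
--         if n > 0:
--             overshoot = n + position - MOD
--         elif position:
--             overshoot = -n - position
--         else:  # 0 compensation
--             overshoot = -n - MOD
--         position = (position + n) % MOD
--         yield 1 + overshoot // MOD if overshoot >= 0 else 0
-- ===== SOURCE B (Python) =====
-- def part2(raw: str):
--     table = str.maketrans({"L": "-", "R": ""})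
--     steps = [int(x) for x in raw.strip().translate(table).split()]
--
--     # staged passes: absolute prefix positions first, then band counts per step
--     pos = [50]
--     for n in steps:
--         pos.append(pos[-1] + n)
--     for prev, new in zip(pos, pos[1:]):
--         if new > prev:
--             yield new // 100 - prev // 100
--         else:
--             yield (prev - 1) // 100 - (new - 1) // 100
-- ===== Notes on version B (the rewrite author's own statement) =====
-- stated objective: alternative
-- what changed: Replaces A's single stateful loop (position mod 100, three-way overshoot branch) by two staged passes: build the list of absolute prefix positions, then map adjacent pairs to counts of multiples of 100 crossed via floor-division differences.
import Mathlib
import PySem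

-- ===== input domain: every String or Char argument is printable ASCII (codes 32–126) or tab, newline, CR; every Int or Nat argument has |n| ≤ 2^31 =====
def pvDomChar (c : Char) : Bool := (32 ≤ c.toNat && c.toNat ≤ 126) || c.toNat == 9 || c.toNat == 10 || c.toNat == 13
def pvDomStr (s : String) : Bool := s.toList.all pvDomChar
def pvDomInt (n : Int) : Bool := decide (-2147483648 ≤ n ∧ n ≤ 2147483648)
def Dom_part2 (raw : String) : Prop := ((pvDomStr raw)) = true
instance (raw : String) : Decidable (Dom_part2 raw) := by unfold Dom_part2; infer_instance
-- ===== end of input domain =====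

-- B replaces A's single stateful mod-100 loop with two staged passes: absolute prefix
-- positions first, then floor-division band counts over adjacent pairs (objective: alternative).

-- ===== PORT A =====
-- raw.strip().translate({"L":"-","R":""}).split()  (identical parsing lines in A and B)
def pvTranslate (cs : List Char) : List Char :=
  cs.flatMap (fun c => if c = 'L' then ['-'] else if c = 'R' then [] else [c])

def pvTokens (raw : String) : List (List Char) :=
  PySem.Chars.split₀ (pvTranslate (PySem.Chars.strip raw.toList))

-- the generator loop of A; a token int() fails on (excluded by Pre_) stops the generator
def part2Loop : List (List Char) → Int → List Int
  | [], _ => []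
  | t :: ts, position =>
    match PySem.Int.ofChars? t with
    | none => []
    | some n =>
      let overshoot : Int :=
        if n > 0 then n + position - 100
        else if position ≠ 0 then -n - position
        else -n - 100
      (if overshoot ≥ 0 then 1 + PySem.Int.floordiv overshoot 100 else 0) ::
        part2Loop ts (PySem.Int.mod (position + n) 100)

def part2 (raw : String) : List Int := part2Loop (pvTokens raw) 50

-- ===== PORT B =====
-- pass 1 of Source B: pos = [50]; for n in steps: pos.append(pos[-1] + n)
def prefixPos : List Int → Int → List Int
  | [], a => [a]
  | n :: ns, a => a :: prefixPos ns (a + n)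

-- pass 2 of Source B: the band count yielded for one adjacent pair (prev, new)
def bandCount (p : Int × Int) : Int :=
  if p.2 > p.1 then PySem.Int.floordiv p.2 100 - PySem.Int.floordiv p.1 100
  else PySem.Int.floordiv (p.1 - 1) 100 - PySem.Int.floordiv (p.2 - 1) 100

def part2_alt (raw : String) : List Int :=
  match (pvTokens raw).mapM PySem.Int.ofChars? with
  | none => []   -- int() raised ValueError; outside Pre_
  | some steps =>
    let pos := prefixPos steps 50
    (pos.zip pos.tail).map bandCount

-- ===== PRECONDITION & SPEC =====
-- Pre_ excludes inputs where some token is not a valid Python int literal: there A's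
-- generator raises ValueError mid-iteration.
def Pre_part2 (raw : String) : Prop :=
  ((pvTokens raw).all (fun t => (PySem.Int.ofChars? t).isSome)) = true
instance (raw : String) : Decidable (Pre_part2 raw) := by unfold Pre_part2; infer_instance

def pvWitness_part2 : String := "L10 R200 R5 L0"

def Spec_part2 (raw : String) (out : List Int) : Prop := out = part2_alt raw
instance (raw : String) (out : List Int) : Decidable (Spec_part2 raw out) := by unfold Spec_part2; infer_instance

-- ===== CLAIM (what is proved, stated in full; the proofs are below) =====
def Claim_equal_part2 : Prop := ∀ (raw : String), Dom_part2 raw → Pre_part2 raw → Spec_part2 raw (part2 raw)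

-- ===== LEMMAS AND PROOFS =====

theorem mapM_some_of_all_isSome : ∀ (ts : List (List Char)),
    (∀ t ∈ ts, (PySem.Int.ofChars? t).isSome) →
    ∃ ns, ts.mapM PySem.Int.ofChars? = some ns := by
  intro ts h
  induction ts with
  | nil => exact ⟨[], rfl⟩
  | cons t ts ih =>
    obtain ⟨n, hn⟩ := Option.isSome_iff_exists.mp (h t (List.mem_cons_self ..))
    obtain ⟨ns', hns'⟩ := ih (fun x hx => h x (List.mem_cons_of_mem _ hx))
    exact ⟨n :: ns', by rw [List.mapM_cons, hn, hns']; rfl⟩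

theorem prefixPos_cons_tail : ∀ (ns : List Int) (a : Int),
    prefixPos ns a = a :: (prefixPos ns a).tail := by
  intro ns a; cases ns <;> rfl

-- loop invariant: A's single loop with reduced position a % 100 equals B's two staged
-- passes over the parsed step list starting from absolute position a
theorem part2Loop_eq : ∀ (ts : List (List Char)) (ns : List Int) (a : Int),
    ts.mapM PySem.Int.ofChars? = some ns →
    part2Loop ts (PySem.Int.mod a 100) =
      ((prefixPos ns a).zip (prefixPos ns a).tail).map bandCount := by
  intro ts
  induction ts with
  | nil =>
    intro ns a h
    simp only [List.mapM_nil, Option.pure_def, Option.some.injEq] at h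
    subst h
    rfl
  | cons t ts ih =>
    intro ns a h
    rw [List.mapM_cons] at h
    cases hn : PySem.Int.ofChars? t with
    | none => simp [hn] at h
    | some n =>
      cases hns : ts.mapM PySem.Int.ofChars? with
      | none => simp [hn, hns] at h
      | some ns' =>
        simp only [hn, hns] at h
        cases h
        simp only [part2Loop, hn]
        have h100 : (0:Int) < 100 := by norm_num
        have hmod : PySem.Int.mod a 100 = a % 100 := PySem.Int.mod_eq_emod_of_pos h100
        have hrec : PySem.Int.mod (PySem.Int.mod a 100 + n) 100 = PySem.Int.mod (a + n) 100 := by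
          rw [hmod, PySem.Int.mod_eq_emod_of_pos h100, PySem.Int.mod_eq_emod_of_pos h100]
          omega
        rw [hrec, ih ns' (a + n) hns]
        have hL := prefixPos_cons_tail ns' (a + n)
        conv_lhs => rw [hL]
        show _ :: _ = _
        simp only [prefixPos]
        conv_rhs => rw [hL]
        simp only [List.zip_cons_cons, List.tail_cons, List.map_cons]
        rw [← hL]
        congr 1
        · simp only [bandCount, hmod]
          simp only [PySem.Int.floordiv_eq_ediv_of_pos h100]
          split_ifs <;> omega

-- ===== VERDICT (by name: the statement is the Claim_ definition above) =====
theorem part2_spec : Claim_equal_part2 := by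
  intro raw _ hpre
  unfold Spec_part2 part2 part2_alt
  unfold Pre_part2 at hpre
  rw [List.all_eq_true] at hpre
  obtain ⟨ns, hns⟩ := mapM_some_of_all_isSome (pvTokens raw) (fun t ht => by simpa using hpre t ht)
  rw [hns]
  have h := part2Loop_eq (pvTokens raw) ns 50 hns
  rw [show PySem.Int.mod 50 100 = (50:Int) from by decide] at h
  exact h
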